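-- pv_equiv track=rewrite | github.com/jengzang/records-backend-go | scripts/tracks/analysis/statistics_v2.py | _analyze_time_distribution
-- ===== SOURCE A (Python) =====
-- from typing import Dict, List, Tuple
-- from collections import Counter
--
-- def _analyze_time_distribution(points: List[Tuple]) -> Dict:
--     """
--     Analyze time distribution statistics.
--
--     Args:
--         points: List of track points
--
--     Returns:
--         Dictionary with time distribution statistics
--     """
--     hour_counter = Counter()
--     year_counter = Counter()
--     month_counter = Counter()
--     year_month_counter = Counter()
--
--     for point_id, data_time, province, city, county, town, village, time_str in points:
--         if time_str and len(time_str) >= 10: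
--             # Extract time components from time string (format: YYYYMMDDHHMMSS)
--             year = time_str[:4]
--             month = time_str[4:6]
--             hour = time_str[8:10]
--             year_month = time_str[:6]
--
--             year_counter[year] += 1
--             month_counter[month] += 1
--             hour_counter[hour] += 1
--             year_month_counter[year_month] += 1
--
--     return {
--         'by_hour': dict(sorted(hour_counter.items())),
--         'by_year': dict(sorted(year_counter.items())),
--         'by_month': dict(sorted(month_counter.items())),
--         'by_year_month': dict(sorted(year_month_counter.items())),
--     }
-- ===== SOURCE B (Python) =====
-- from collections import Counter
--
-- def _analyze_time_distribution(points):
--     valid = [time_str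
--              for (point_id, data_time, province, city, county, town, village, time_str) in points
--              if time_str and len(time_str) >= 10]
--     return {
--         'by_hour': dict(sorted(Counter(t[8:10] for t in valid).items())),
--         'by_year': dict(sorted(Counter(t[:4] for t in valid).items())),
--         'by_month': dict(sorted(Counter(t[4:6] for t in valid).items())),
--         'by_year_month': dict(sorted(Counter(t[:6] for t in valid).items())),
--     }
-- ===== Notes on version B (the rewrite author's own statement) =====
-- stated objective: alternative
-- what changed: Replaced A's single pass that increments four counters in lockstep with a pre-filter of the valid timestamp strings followed by four independent Counter-then-sort scans of that list.
import Mathlib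
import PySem

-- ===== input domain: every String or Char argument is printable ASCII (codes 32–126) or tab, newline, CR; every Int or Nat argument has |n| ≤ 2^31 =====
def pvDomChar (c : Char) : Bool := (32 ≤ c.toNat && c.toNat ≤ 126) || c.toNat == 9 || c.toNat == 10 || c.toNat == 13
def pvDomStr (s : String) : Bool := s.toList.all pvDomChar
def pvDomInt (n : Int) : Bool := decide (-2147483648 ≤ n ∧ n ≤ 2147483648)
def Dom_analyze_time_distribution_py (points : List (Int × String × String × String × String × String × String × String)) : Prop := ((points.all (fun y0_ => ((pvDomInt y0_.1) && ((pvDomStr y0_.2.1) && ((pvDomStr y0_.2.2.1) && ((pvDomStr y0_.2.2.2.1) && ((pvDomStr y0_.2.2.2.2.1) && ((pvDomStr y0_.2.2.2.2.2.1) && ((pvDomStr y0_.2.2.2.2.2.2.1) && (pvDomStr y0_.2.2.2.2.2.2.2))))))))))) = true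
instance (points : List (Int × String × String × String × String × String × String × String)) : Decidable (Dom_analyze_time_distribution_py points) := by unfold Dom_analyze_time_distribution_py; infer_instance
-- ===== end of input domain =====

-- B pre-filters the valid timestamp strings once and builds each of the four sorted counters
-- by an independent scan of that list, instead of A's single pass incrementing four counters in step
-- (objective: alternative decomposition, same cost).


-- shared shorthand for Python's `time_str and len(time_str) >= 10` (identical guard in A and B)
def pvTsOk (t : String) : Bool := (!(t == "")) && decide (10 ≤ PySem.Str.len t)

-- ===== PORT A =====
-- one pass over points; state = the four Counters (hour, year, month, year_month);
-- Counter[k] += 1 is Dict.modify k 0 (·+1); sorted(counter.items()) sorts pairs whose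
-- first components are distinct dict keys, so Python's tuple sort equals the stable sort by key.
def analyze_time_distribution_py (points : List (Int × String × String × String × String × String × String × String)) : List (String × List (String × Int)) :=
  let r := points.foldl
    (fun st p =>
      let t := p.2.2.2.2.2.2.2
      if pvTsOk t then
        (st.1.modify (PySem.Str.slice t (some 8) (some 10)) 0 (· + 1),
         st.2.1.modify (PySem.Str.slice t none (some 4)) 0 (· + 1),
         st.2.2.1.modify (PySem.Str.slice t (some 4) (some 6)) 0 (· + 1),
         st.2.2.2.modify (PySem.Str.slice t none (some 6)) 0 (· + 1))
      else st)
    ((PySem.Dict.empty : PySem.Dict String Int), (PySem.Dict.empty : PySem.Dict String Int),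
     (PySem.Dict.empty : PySem.Dict String Int), (PySem.Dict.empty : PySem.Dict String Int))
  [("by_hour", PySem.List.sorted r.1.items (fun q => q.1) false),
   ("by_year", PySem.List.sorted r.2.1.items (fun q => q.1) false),
   ("by_month", PySem.List.sorted r.2.2.1.items (fun q => q.1) false),
   ("by_year_month", PySem.List.sorted r.2.2.2.items (fun q => q.1) false)]

-- ===== PORT B =====
-- dict(sorted(Counter(<slice> for t in valid).items())), for one slicing function
def pvTable (valid : List String) (cut : String → String) : List (String × Int) :=
  PySem.List.sorted (PySem.Dict.counter (valid.map cut)).items (fun q => q.1) false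

def analyze_time_distribution_py_alt (points : List (Int × String × String × String × String × String × String × String)) : List (String × List (String × Int)) :=
  let valid := (points.filter (fun p => pvTsOk p.2.2.2.2.2.2.2)).map (fun p => p.2.2.2.2.2.2.2)
  [("by_hour", pvTable valid (fun t => PySem.Str.slice t (some 8) (some 10))),
   ("by_year", pvTable valid (fun t => PySem.Str.slice t none (some 4))),
   ("by_month", pvTable valid (fun t => PySem.Str.slice t (some 4) (some 6))),
   ("by_year_month", pvTable valid (fun t => PySem.Str.slice t none (some 6)))]

-- ===== PRECONDITION & SPEC =====
def Spec_analyze_time_distribution_py (points : List (Int × String × String × String × String × String × String × String)) (out : List (String × List (String × Int))) : Prop := out = analyze_time_distribution_py_alt points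
instance (points : List (Int × String × String × String × String × String × String × String)) (out : List (String × List (String × Int))) : Decidable (Spec_analyze_time_distribution_py points out) := by unfold Spec_analyze_time_distribution_py; infer_instance

-- ===== CLAIM (what is proved, stated in full; the proofs are below) =====
def Claim_equal_analyze_time_distribution_py : Prop := ∀ (points : List (Int × String × String × String × String × String × String × String)), Dom_analyze_time_distribution_py points → Spec_analyze_time_distribution_py points (analyze_time_distribution_py points)

-- ===== LEMMAS AND PROOFS =====

-- A's combined four-counter pass, componentwise, equals a counting fold over B's filtered list.
theorem pvFold_split (points : List (Int × String × String × String × String × String × String × String))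
    (h y m ym : PySem.Dict String Int) :
    points.foldl
      (fun st p =>
        let t := p.2.2.2.2.2.2.2
        if pvTsOk t then
          (st.1.modify (PySem.Str.slice t (some 8) (some 10)) 0 (· + 1),
           st.2.1.modify (PySem.Str.slice t none (some 4)) 0 (· + 1),
           st.2.2.1.modify (PySem.Str.slice t (some 4) (some 6)) 0 (· + 1),
           st.2.2.2.modify (PySem.Str.slice t none (some 6)) 0 (· + 1))
        else st)
      (h, y, m, ym) =
    (let v := (points.filter (fun p => pvTsOk p.2.2.2.2.2.2.2)).map (fun p => p.2.2.2.2.2.2.2)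
     (v.foldl (fun d t => d.modify (PySem.Str.slice t (some 8) (some 10)) 0 (· + 1)) h,
      v.foldl (fun d t => d.modify (PySem.Str.slice t none (some 4)) 0 (· + 1)) y,
      v.foldl (fun d t => d.modify (PySem.Str.slice t (some 4) (some 6)) 0 (· + 1)) m,
      v.foldl (fun d t => d.modify (PySem.Str.slice t none (some 6)) 0 (· + 1)) ym)) := by
  induction points generalizing h y m ym with
  | nil => rfl
  | cons p rest ih =>
    by_cases hp : pvTsOk p.2.2.2.2.2.2.2
    · simp only [List.foldl_cons, List.filter_cons, hp, List.foldl_cons]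
      exact ih _ _ _ _
    · simp only [List.foldl_cons, List.filter_cons, hp, Bool.false_eq_true, if_false]
      exact ih _ _ _ _

theorem analyze_eq (points : List (Int × String × String × String × String × String × String × String)) :
    analyze_time_distribution_py points = analyze_time_distribution_py_alt points := by
  unfold analyze_time_distribution_py analyze_time_distribution_py_alt pvTable
  rw [pvFold_split]
  simp only [PySem.Dict.counter_eq_foldl, List.foldl_map]

-- ===== VERDICT (by name: the statement is the Claim_ definition above) =====
theorem analyze_time_distribution_py_spec : Claim_equal_analyze_time_distribution_py := by
  intro points _
  unfold Spec_analyze_time_distribution_py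
  exact analyze_eq points
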